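-- pv_equiv track=rewrite | github.com/blegloannec/CodeProblems | Codeforces/878A.py | simu
-- ===== SOURCE A (Python) =====
-- def simu(P,i):
--     for c,x in P:
--         if c=='&':
--             i &= x
--         elif c=='|':
--             i |= x
--         else:
--             i ^= x
--     return i
-- ===== SOURCE B (Python) =====
-- def simu(P, i):
--     # Precompute the collapsed transformation: any sequence of &,|,^ ops is
--     # equivalent to  v -> (v & m1) ^ m2.  Track the images of 0 and -1.
--     m2 = 0          # image of 0 (all-zero bits)
--     r1 = -1         # image of -1 (all-one bits)
--     for c, x in P:
--         if c == '&':
--             m2 &= x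
--             r1 &= x
--         elif c == '|':
--             m2 |= x
--             r1 |= x
--         else:
--             m2 ^= x
--             r1 ^= x
--     return (i & (r1 ^ m2)) ^ m2
-- ===== Notes on version B (the rewrite author's own statement) =====
-- stated objective: alternative
-- what changed: Instead of folding the op list over i, B folds it once over the two constant probes 0 and -1 to obtain masks m2 and r1 and returns the closed form (i & (r1 ^ m2)) ^ m2, exploiting that every &/|/^ sequence collapses bitwise to v -> (v & M1) ^ M2.
import Mathlib
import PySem

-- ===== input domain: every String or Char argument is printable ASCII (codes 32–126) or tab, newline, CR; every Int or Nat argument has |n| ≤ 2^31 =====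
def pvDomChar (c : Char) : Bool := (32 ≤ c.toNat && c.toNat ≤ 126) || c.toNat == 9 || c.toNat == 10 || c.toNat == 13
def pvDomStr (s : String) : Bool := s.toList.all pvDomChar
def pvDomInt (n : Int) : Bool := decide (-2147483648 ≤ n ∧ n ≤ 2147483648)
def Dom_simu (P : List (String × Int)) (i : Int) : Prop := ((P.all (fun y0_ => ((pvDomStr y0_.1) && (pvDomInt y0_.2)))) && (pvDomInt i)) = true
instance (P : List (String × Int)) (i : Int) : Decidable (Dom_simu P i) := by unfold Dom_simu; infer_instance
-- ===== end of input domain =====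

-- B replaces A's fold of the op list over i by folding it over the constant probes 0 and -1
-- (one pass, two masks) and returning the closed form (i & (r1 ^ m2)) ^ m2 (alternative decomposition).


-- ===== PORT A =====
-- one loop step of A: apply op (c,x) to the running value
def simuStep (v : Int) (p : String × Int) : Int :=
  if p.1 == "&" then PySem.Int.band v p.2
  else if p.1 == "|" then PySem.Int.bor v p.2
  else PySem.Int.bxor v p.2

def simu (P : List (String × Int)) (i : Int) : Int :=
  P.foldl simuStep i

-- ===== PORT B =====
-- one loop step of B: apply op (c,x) to both masks (m2, r1)
def simuAltStep (mr : Int × Int) (p : String × Int) : Int × Int :=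
  if p.1 == "&" then (PySem.Int.band mr.1 p.2, PySem.Int.band mr.2 p.2)
  else if p.1 == "|" then (PySem.Int.bor mr.1 p.2, PySem.Int.bor mr.2 p.2)
  else (PySem.Int.bxor mr.1 p.2, PySem.Int.bxor mr.2 p.2)

def simu_alt (P : List (String × Int)) (i : Int) : Int :=
  let mr := P.foldl simuAltStep (0, -1)
  PySem.Int.bxor (PySem.Int.band i (PySem.Int.bxor mr.2 mr.1)) mr.1

-- ===== PRECONDITION & SPEC =====
def Spec_simu (P : List (String × Int)) (i : Int) (out : Int) : Prop := out = simu_alt P i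
instance (P : List (String × Int)) (i : Int) (out : Int) : Decidable (Spec_simu P i out) := by unfold Spec_simu; infer_instance

-- ===== CLAIM (what is proved, stated in full; the proofs are below) =====
def Claim_equal_simu : Prop := ∀ (P : List (String × Int)) (i : Int), Dom_simu P i → Spec_simu P i (simu P i)

-- ===== LEMMAS AND PROOFS =====

-- (m &&& n) + ldiff m n = m  (the common and the exclusive bits of m partition m)
theorem pvLandAddLdiff (m : Nat) : ∀ n : Nat, (m &&& n) + Nat.ldiff m n = m := by
  induction m using Nat.binaryRec with
  | zero =>
    intro n
    have h1 : (0 &&& n) = 0 := Nat.zero_and n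
    have h2 : Nat.ldiff 0 n = 0 := by
      apply Nat.eq_of_testBit_eq
      intro k
      simp [Nat.testBit_ldiff]
    omega
  | bit b m ih =>
    intro n
    conv_lhs => rw [← Nat.bit_testBit_zero_shiftRight_one n]
    rw [Nat.land_bit, Nat.ldiff_bit]
    have := ih (n >>> 1)
    cases b <;> cases hn : n.testBit 0 <;>
      simp [Nat.bit_val] <;> omega

theorem pvSubLand (m n : Nat) : m - (m &&& n) = Nat.ldiff m n := by
  have := pvLandAddLdiff m n
  omega

theorem pvNegSubOne (z : Nat) : -(z : Int) - 1 = Int.negSucc z := by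
  rw [Int.negSucc_eq]; ring

-- PySem's Python-exact bitwise ops coincide with Mathlib's Int.land/lor/xor
theorem pvH1 (n : Nat) : ¬ (0:Int) ≤ Int.negSucc n :=
  Int.not_le.mpr (Int.negSucc_lt_zero n)

theorem pvH2 (n : Nat) : -Int.negSucc n - 1 = (n : Int) := by
  rw [Int.negSucc_eq]; ring

theorem pvBandEq (a b : Int) : PySem.Int.band a b = Int.land a b := by
  cases a with
  | ofNat m =>
    cases b with
    | ofNat n => simp [PySem.Int.band, Int.land]
    | negSucc n =>
      simp only [PySem.Int.band, Int.land]
      rw [if_pos (show (0:Int) ≤ Int.ofNat m from Int.ofNat_nonneg m), if_neg (pvH1 n), pvH2]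
      simp [pvSubLand]
  | negSucc m =>
    cases b with
    | ofNat n =>
      simp only [PySem.Int.band, Int.land]
      rw [if_neg (pvH1 m), if_pos (show (0:Int) ≤ Int.ofNat n from Int.ofNat_nonneg n), pvH2]
      simp [pvSubLand]
    | negSucc n =>
      simp only [PySem.Int.band, Int.land]
      rw [if_neg (pvH1 m), if_neg (pvH1 n), pvH2, pvH2]
      simp [pvNegSubOne]

theorem pvBorEq (a b : Int) : PySem.Int.bor a b = Int.lor a b := by
  cases a with
  | ofNat m =>
    cases b with
    | ofNat n => simp [PySem.Int.bor, Int.lor]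
    | negSucc n =>
      simp only [PySem.Int.bor, Int.lor]
      rw [if_pos (show (0:Int) ≤ Int.ofNat m from Int.ofNat_nonneg m), if_neg (pvH1 n), pvH2]
      simp [pvNegSubOne]
      rw [pvSubLand]
  | negSucc m =>
    cases b with
    | ofNat n =>
      simp only [PySem.Int.bor, Int.lor]
      rw [if_neg (pvH1 m), if_pos (show (0:Int) ≤ Int.ofNat n from Int.ofNat_nonneg n), pvH2]
      simp [pvSubLand, pvNegSubOne]
    | negSucc n =>
      simp only [PySem.Int.bor, Int.lor]
      rw [if_neg (pvH1 m), if_neg (pvH1 n), pvH2, pvH2]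
      simp [pvNegSubOne]

theorem pvBxorEq (a b : Int) : PySem.Int.bxor a b = Int.xor a b := by
  cases a with
  | ofNat m =>
    cases b with
    | ofNat n => simp [PySem.Int.bxor, Int.xor]
    | negSucc n =>
      simp only [PySem.Int.bxor, Int.xor]
      rw [if_pos (show (0:Int) ≤ Int.ofNat m from Int.ofNat_nonneg m), if_neg (pvH1 n), pvH2]
      simp [pvNegSubOne]
  | negSucc m =>
    cases b with
    | ofNat n =>
      simp only [PySem.Int.bxor, Int.xor]
      rw [if_neg (pvH1 m), if_pos (show (0:Int) ≤ Int.ofNat n from Int.ofNat_nonneg n), pvH2]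
      simp [pvNegSubOne]
    | negSucc n =>
      simp only [PySem.Int.bxor, Int.xor]
      rw [if_neg (pvH1 m), if_neg (pvH1 n), pvH2, pvH2]
      simp

theorem pvTestBitNegOne (k : Nat) : (-1 : Int).testBit k = true := by
  show (Int.negSucc 0).testBit k = true
  simp [Int.testBit]

theorem pvTestBitZero (k : Nat) : (0 : Int).testBit k = false := by
  simp [Int.testBit]

-- extensionality of Int by bits
theorem pvIntExt (a b : Int) (h : ∀ k, a.testBit k = b.testBit k) : a = b := by
  cases a with
  | ofNat m =>
    cases b with
    | ofNat n =>
      have : m = n := by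
        apply Nat.eq_of_testBit_eq
        intro k
        exact h k
      simp [this]
    | negSucc n =>
      exfalso
      have hk := h (m + n)
      have hm : m.testBit (m + n) = false :=
        Nat.testBit_lt_two_pow (lt_of_lt_of_le (Nat.lt_two_pow_self)
          (Nat.pow_le_pow_right (by norm_num) (Nat.le_add_right m n)))
      have hn : n.testBit (m + n) = false :=
        Nat.testBit_lt_two_pow (lt_of_lt_of_le (Nat.lt_two_pow_self)
          (Nat.pow_le_pow_right (by norm_num) (Nat.le_add_left n m)))
      simp [Int.testBit, hm, hn] at hk
  | negSucc m =>
    cases b with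
    | ofNat n =>
      exfalso
      have hk := h (m + n)
      have hm : m.testBit (m + n) = false :=
        Nat.testBit_lt_two_pow (lt_of_lt_of_le (Nat.lt_two_pow_self)
          (Nat.pow_le_pow_right (by norm_num) (Nat.le_add_right m n)))
      have hn : n.testBit (m + n) = false :=
        Nat.testBit_lt_two_pow (lt_of_lt_of_le (Nat.lt_two_pow_self)
          (Nat.pow_le_pow_right (by norm_num) (Nat.le_add_left n m)))
      simp [Int.testBit, hm, hn] at hk
    | negSucc n =>
      have : m = n := by
        apply Nat.eq_of_testBit_eq
        intro k
        have hk := h k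
        simpa [Int.testBit] using hk
      simp [this]

-- per-op closed-form identities (bitwise, proved bit by bit)
theorem pvKeyAnd (i x M F : Int) :
    PySem.Int.bxor (PySem.Int.band (PySem.Int.band i x) M) F =
    PySem.Int.bxor (PySem.Int.band i (PySem.Int.bxor
        (PySem.Int.bxor (PySem.Int.band (PySem.Int.band (-1) x) M) F)
        (PySem.Int.bxor (PySem.Int.band (PySem.Int.band 0 x) M) F)))
      (PySem.Int.bxor (PySem.Int.band (PySem.Int.band 0 x) M) F) := by
  apply pvIntExt
  intro k
  simp only [pvBandEq, pvBxorEq, Int.testBit_lxor, Int.testBit_land,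
    pvTestBitNegOne, pvTestBitZero]
  cases i.testBit k <;> cases x.testBit k <;> cases M.testBit k <;> cases F.testBit k <;> rfl

theorem pvKeyOr (i x M F : Int) :
    PySem.Int.bxor (PySem.Int.band (PySem.Int.bor i x) M) F =
    PySem.Int.bxor (PySem.Int.band i (PySem.Int.bxor
        (PySem.Int.bxor (PySem.Int.band (PySem.Int.bor (-1) x) M) F)
        (PySem.Int.bxor (PySem.Int.band (PySem.Int.bor 0 x) M) F)))
      (PySem.Int.bxor (PySem.Int.band (PySem.Int.bor 0 x) M) F) := by
  apply pvIntExt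
  intro k
  simp only [pvBandEq, pvBorEq, pvBxorEq, Int.testBit_lxor, Int.testBit_land,
    Int.testBit_lor, pvTestBitNegOne, pvTestBitZero]
  cases i.testBit k <;> cases x.testBit k <;> cases M.testBit k <;> cases F.testBit k <;> rfl

theorem pvKeyXor (i x M F : Int) :
    PySem.Int.bxor (PySem.Int.band (PySem.Int.bxor i x) M) F =
    PySem.Int.bxor (PySem.Int.band i (PySem.Int.bxor
        (PySem.Int.bxor (PySem.Int.band (PySem.Int.bxor (-1) x) M) F)
        (PySem.Int.bxor (PySem.Int.band (PySem.Int.bxor 0 x) M) F)))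
      (PySem.Int.bxor (PySem.Int.band (PySem.Int.bxor 0 x) M) F) := by
  apply pvIntExt
  intro k
  simp only [pvBandEq, pvBxorEq, Int.testBit_lxor, Int.testBit_land,
    pvTestBitNegOne, pvTestBitZero]
  cases i.testBit k <;> cases x.testBit k <;> cases M.testBit k <;> cases F.testBit k <;> rfl

-- the collapsed closed form for A's fold
theorem pvMain (P : List (String × Int)) : ∀ i : Int,
    P.foldl simuStep i =
      PySem.Int.bxor (PySem.Int.band i
          (PySem.Int.bxor (P.foldl simuStep (-1)) (P.foldl simuStep 0)))
        (P.foldl simuStep 0) := by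
  induction P with
  | nil =>
    intro i
    simp [PySem.Int.bxor_zero, PySem.Int.band_neg_one]
  | cons p tl ih =>
    intro i
    simp only [List.foldl_cons]
    rw [ih (simuStep i p), ih (simuStep (-1) p), ih (simuStep 0 p)]
    by_cases h1 : p.1 == "&"
    · simp only [simuStep, h1, if_pos]
      exact pvKeyAnd i p.2 _ _
    · by_cases h2 : p.1 == "|"
      · simp only [simuStep, h1, h2, Bool.false_eq_true, if_false, if_pos]
        exact pvKeyOr i p.2 _ _
      · simp only [simuStep, h1, h2, Bool.false_eq_true, if_false]
        exact pvKeyXor i p.2 _ _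

-- B's pair fold computes A's fold from 0 and from -1
theorem pvPairFold (P : List (String × Int)) : ∀ m r : Int,
    P.foldl simuAltStep (m, r) = (P.foldl simuStep m, P.foldl simuStep r) := by
  induction P with
  | nil => intro m r; rfl
  | cons p tl ih =>
    intro m r
    simp only [List.foldl_cons]
    rw [← ih]
    congr 1
    simp only [simuAltStep, simuStep]
    by_cases h1 : p.1 == "&" <;> by_cases h2 : p.1 == "|" <;> simp [h1, h2]

-- ===== VERDICT (by name: the statement is the Claim_ definition above) =====
theorem simu_spec : Claim_equal_simu := by
  intro P i _
  unfold Spec_simu simu simu_alt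
  rw [pvPairFold]
  exact pvMain P i
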